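-- pv_equiv track=rewrite | github.com/purelyricky/gsam | generate_clean_results.py | make_formula_samples
-- ===== SOURCE A (Python) =====
-- FORMULA_CORRECT_POOL = [
--     ("3.0", "3.0"),
--     ("5.0", "5.0"),
--     ("18.45", "18.45"),
--     ("0.57", "0.57"),
--     ("14.0", "14.0"),
--     ("2.5", "2.5"),
--     ("7.8", "7.8"),
--     ("0.33", "0.33"),
--     ("42.0", "42.0"),
--     ("1.25", "1.25"),
--     ("9.6", "9.6"),
--     ("0.12", "0.12"),
--     ("120.0", "120.0"),
--     ("4.75", "4.75"),
--     ("0.88", "0.88"),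
-- ]
--
-- FORMULA_WRONG_POOL = [
--     ("0.15", "15.0"),    # scale error
--     ("637.10", "637.07"), # rounding
--     ("0.48", "0.47"),    # rounding
--     ("2.50", "25.0"),    # scale error
--     ("0.033", "0.33"),   # decimal error
-- ]
--
-- def make_formula_samples(n_total, n_correct):
--     answers = []
--     targets = []
--     correct_count = 0
--     wrong_count = 0
--     for i in range(n_total):
--         if correct_count < n_correct:
--             ans, tgt = FORMULA_CORRECT_POOL[correct_count % len(FORMULA_CORRECT_POOL)]
--             answers.append(ans)
--             targets.append(tgt)
--             correct_count += 1
--         else: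
--             ans, tgt = FORMULA_WRONG_POOL[wrong_count % len(FORMULA_WRONG_POOL)]
--             answers.append(ans)
--             targets.append(tgt)
--             wrong_count += 1
--     return answers, targets
-- ===== SOURCE B (Python) =====
-- FORMULA_CORRECT_POOL = [
--     ("3.0", "3.0"),
--     ("5.0", "5.0"),
--     ("18.45", "18.45"),
--     ("0.57", "0.57"),
--     ("14.0", "14.0"),
--     ("2.5", "2.5"),
--     ("7.8", "7.8"),
--     ("0.33", "0.33"),
--     ("42.0", "42.0"),
--     ("1.25", "1.25"),
--     ("9.6", "9.6"),
--     ("0.12", "0.12"),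
--     ("120.0", "120.0"),
--     ("4.75", "4.75"),
--     ("0.88", "0.88"),
-- ]
--
-- FORMULA_WRONG_POOL = [
--     ("0.15", "15.0"),
--     ("637.10", "637.07"),
--     ("0.48", "0.47"),
--     ("2.50", "25.0"),
--     ("0.033", "0.33"),
-- ]
--
-- def make_formula_samples(n_total, n_correct):
--     n_c = max(0, min(n_correct, n_total))
--     n_w = n_total - n_c
--     pairs = [FORMULA_CORRECT_POOL[i % len(FORMULA_CORRECT_POOL)] for i in range(n_c)] \
--           + [FORMULA_WRONG_POOL[i % len(FORMULA_WRONG_POOL)] for i in range(n_w)]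
--     return [p[0] for p in pairs], [p[1] for p in pairs]
-- ===== Notes on version B (the rewrite author's own statement) =====
-- stated objective: alternative
-- what changed: Replaced A's single stateful loop (two running counters, branch per element) by computing the correct/wrong counts up front with a clamp, building the two pair lists by independent comprehensions over ranges, concatenating, and unzipping into the two result lists.
import Mathlib
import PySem

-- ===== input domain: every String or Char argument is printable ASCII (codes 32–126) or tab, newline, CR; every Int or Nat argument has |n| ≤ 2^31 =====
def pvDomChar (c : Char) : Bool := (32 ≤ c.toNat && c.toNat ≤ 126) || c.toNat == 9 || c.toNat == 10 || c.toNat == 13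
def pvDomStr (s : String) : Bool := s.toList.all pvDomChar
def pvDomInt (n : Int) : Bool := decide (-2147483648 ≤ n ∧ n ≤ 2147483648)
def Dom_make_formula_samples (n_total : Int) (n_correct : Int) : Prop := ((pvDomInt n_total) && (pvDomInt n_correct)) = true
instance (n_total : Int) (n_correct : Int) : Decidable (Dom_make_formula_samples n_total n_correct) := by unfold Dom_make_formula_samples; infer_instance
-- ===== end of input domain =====

-- B replaces A's stateful branch-per-element loop by clamped counts + two range comprehensions + an unzip (objective: alternative decomposition, same cost).

-- module constants shared by both Pythons
def FORMULA_CORRECT_POOL : List (String × String) :=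
  [("3.0", "3.0"), ("5.0", "5.0"), ("18.45", "18.45"), ("0.57", "0.57"),
   ("14.0", "14.0"), ("2.5", "2.5"), ("7.8", "7.8"), ("0.33", "0.33"),
   ("42.0", "42.0"), ("1.25", "1.25"), ("9.6", "9.6"), ("0.12", "0.12"),
   ("120.0", "120.0"), ("4.75", "4.75"), ("0.88", "0.88")]

def FORMULA_WRONG_POOL : List (String × String) :=
  [("0.15", "15.0"), ("637.10", "637.07"), ("0.48", "0.47"),
   ("2.50", "25.0"), ("0.033", "0.33")]

-- ===== PORT A =====
-- the for-loop of A as fuel recursion over the iteration count (range(n_total) runs n_total.toNat times; i is unused in the body)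
def pvALoop : Nat → Int → List String → List String → Int → Int → List String × List String
  | 0, _, answers, targets, _, _ => (answers, targets)
  | k+1, n_correct, answers, targets, correct_count, wrong_count =>
    if correct_count < n_correct then
      let p := (PySem.List.pyGet? FORMULA_CORRECT_POOL (PySem.Int.mod correct_count 15)).getD ("", "")
      pvALoop k n_correct (answers ++ [p.1]) (targets ++ [p.2]) (correct_count + 1) wrong_count
    else
      let p := (PySem.List.pyGet? FORMULA_WRONG_POOL (PySem.Int.mod wrong_count 5)).getD ("", "")
      pvALoop k n_correct (answers ++ [p.1]) (targets ++ [p.2]) correct_count (wrong_count + 1)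

def make_formula_samples (n_total : Int) (n_correct : Int) : List String × List String :=
  pvALoop n_total.toNat n_correct [] [] 0 0

-- ===== PORT B =====
def make_formula_samples_alt (n_total : Int) (n_correct : Int) : List String × List String :=
  let n_c := max 0 (min n_correct n_total)
  let n_w := n_total - n_c
  let pairs :=
    (PySem.List.pyRange 0 n_c 1).map
      (fun i => (PySem.List.pyGet? FORMULA_CORRECT_POOL (PySem.Int.mod i 15)).getD ("", ""))
    ++ (PySem.List.pyRange 0 n_w 1).map
      (fun i => (PySem.List.pyGet? FORMULA_WRONG_POOL (PySem.Int.mod i 5)).getD ("", ""))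
  (pairs.map Prod.fst, pairs.map Prod.snd)

-- ===== PRECONDITION & SPEC =====
def Spec_make_formula_samples (n_total : Int) (n_correct : Int) (out : List String × List String) : Prop := out = make_formula_samples_alt n_total n_correct
instance (n_total : Int) (n_correct : Int) (out : List String × List String) : Decidable (Spec_make_formula_samples n_total n_correct out) := by unfold Spec_make_formula_samples; infer_instance

-- ===== CLAIM (what is proved, stated in full; the proofs are below) =====
def Claim_equal_make_formula_samples : Prop := ∀ (n_total : Int) (n_correct : Int), Dom_make_formula_samples n_total n_correct → Spec_make_formula_samples n_total n_correct (make_formula_samples n_total n_correct)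

-- ===== LEMMAS AND PROOFS =====

def pvCP (j : Int) : String × String :=
  (PySem.List.pyGet? FORMULA_CORRECT_POOL (PySem.Int.mod j 15)).getD ("", "")
def pvWP (j : Int) : String × String :=
  (PySem.List.pyGet? FORMULA_WRONG_POOL (PySem.Int.mod j 5)).getD ("", "")

lemma pvALoop_eq (k : Nat) : ∀ (nc cc wc : Int) (ans tgt : List String),
    pvALoop k nc ans tgt cc wc =
      ( ans ++ (List.range (min k (nc - cc).toNat)).map (fun (i : Nat) => (pvCP (cc + (i : Int))).1)
            ++ (List.range (k - min k (nc - cc).toNat)).map (fun (i : Nat) => (pvWP (wc + (i : Int))).1),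
        tgt ++ (List.range (min k (nc - cc).toNat)).map (fun (i : Nat) => (pvCP (cc + (i : Int))).2)
            ++ (List.range (k - min k (nc - cc).toNat)).map (fun (i : Nat) => (pvWP (wc + (i : Int))).2) ) := by
  induction k with
  | zero => intro nc cc wc ans tgt; simp [pvALoop]
  | succ k ih =>
    intro nc cc wc ans tgt
    rw [pvALoop]
    by_cases h : cc < nc
    · rw [if_pos h, ih]
      have hm : min (k+1) (nc - cc).toNat = min k (nc - (cc+1)).toNat + 1 := by omega
      rw [hm]
      have hk : (k + 1) - (min k (nc - (cc+1)).toNat + 1) = k - min k (nc - (cc+1)).toNat := by omega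
      rw [hk, List.range_succ_eq_map]
      simp only [List.map_cons, List.map_map, List.append_assoc, List.cons_append,
        List.nil_append, Function.comp_def, pvCP]
      push_cast
      ring_nf
    · rw [if_neg h, ih]
      have hm : min (k+1) (nc - cc).toNat = 0 := by omega
      have hm' : min k (nc - cc).toNat = 0 := by omega
      rw [hm, hm']
      simp only [Nat.sub_zero, List.range_succ_eq_map]
      simp only [List.map_cons, List.map_map, List.range_zero, List.map_nil, List.nil_append,
        List.append_assoc, List.cons_append, Function.comp_def, pvWP]
      push_cast
      ring_nf

-- ===== VERDICT (by name: the statement is the Claim_ definition above) =====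
theorem make_formula_samples_spec : Claim_equal_make_formula_samples := by
  intro nt nc _
  unfold Spec_make_formula_samples make_formula_samples
  dsimp only [make_formula_samples_alt]
  rw [pvALoop_eq]
  rw [PySem.List.pyRange_one, PySem.List.pyRange_one]
  have h1 : (max 0 (min nc nt) - 0).toNat = min nt.toNat (nc - 0).toNat := by omega
  have h2 : (nt - max 0 (min nc nt) - 0).toNat = nt.toNat - min nt.toNat (nc - 0).toNat := by omega
  simp only [h1, h2, List.map_map, List.map_append, List.nil_append]
  simp [pvCP, pvWP, Function.comp_def]
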